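-- pv_equiv track=rewrite | github.com/LeeGukHeon/AutoLife | scripts/verify_baseline.py | _find_duplicate_strings
-- ===== SOURCE A (Python) =====
-- from typing import List, Tuple
--
-- def _find_duplicate_strings(values: List[str]) -> List[str]:
--     counts = {}
--     for item in values:
--         key = str(item).strip().lower()
--         if not key:
--             continue
--         counts[key] = counts.get(key, 0) + 1
--     return sorted([k for k, c in counts.items() if int(c) > 1])
-- ===== SOURCE B (Python) =====
-- from typing import List
--
-- def _find_duplicate_strings(values: List[str]) -> List[str]:
--     keys = sorted(k for k in (str(v).strip().lower() for v in values) if k)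
--     out = []
--     prev = None
--     last = None
--     for k in keys:
--         if k == prev and k != last:
--             out.append(k)
--             last = k
--         prev = k
--     return out
-- ===== Notes on version B (the rewrite author's own statement) =====
-- stated objective: alternative
-- what changed: Replaces the counting dict (count per key, then filter count>1, then sort) with a sort-first algorithm: normalize and sort the keys, then scan adjacent elements emitting each key that equals its predecessor, once per run; no counts are ever maintained.
import Mathlib
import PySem

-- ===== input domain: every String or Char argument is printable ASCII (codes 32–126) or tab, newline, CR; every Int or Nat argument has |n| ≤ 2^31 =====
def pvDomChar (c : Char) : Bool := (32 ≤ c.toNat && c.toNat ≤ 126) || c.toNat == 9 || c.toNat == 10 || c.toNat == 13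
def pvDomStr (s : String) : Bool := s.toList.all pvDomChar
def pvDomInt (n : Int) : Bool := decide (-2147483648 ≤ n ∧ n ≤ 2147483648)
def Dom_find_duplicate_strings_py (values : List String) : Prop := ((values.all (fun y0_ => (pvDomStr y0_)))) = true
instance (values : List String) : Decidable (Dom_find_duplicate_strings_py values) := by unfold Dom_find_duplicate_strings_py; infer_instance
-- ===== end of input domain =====

-- B replaces A's counting dict with sort-first adjacent-duplicate scanning; objective: alternative algorithm.

-- ===== PORT A =====
-- normalization shared by both Pythons: str(item).strip().lower()
def pvKey (item : String) : String := PySem.Str.lower (PySem.Str.strip item)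

-- A's loop body: key = str(item).strip().lower(); skip empty; counts[key] = counts.get(key, 0) + 1
def pvStepA (counts : PySem.Dict String Int) (item : String) : PySem.Dict String Int :=
  let key := pvKey item
  if key = "" then counts
  else counts.insert key (counts.getD key 0 + 1)

def find_duplicate_strings_py (values : List String) : List String :=
  let counts := values.foldl pvStepA PySem.Dict.empty
  PySem.List.sorted ((counts.items.filter (fun p => decide (1 < p.2))).map (fun p => p.1))
    (fun x => x) false

-- ===== PORT B =====
-- B's loop body over the SORTED normalized keys, state (out, prev, last):
--   if k == prev and k != last: out.append(k); last = k
--   prev = k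
def pvStepB (st : List String × Option String × Option String) (k : String) :
    List String × Option String × Option String :=
  if st.2.1 = some k ∧ ¬ st.2.2 = some k then (st.1 ++ [k], some k, some k)
  else (st.1, some k, st.2.2)

def find_duplicate_strings_py_alt (values : List String) : List String :=
  let keys := PySem.List.sorted ((values.map pvKey).filter (fun k => k != "")) (fun x => x) false
  (keys.foldl pvStepB ([], none, none)).1

-- ===== PRECONDITION & SPEC =====
def Spec_find_duplicate_strings_py (values : List String) (out : List String) : Prop := out = find_duplicate_strings_py_alt values
instance (values : List String) (out : List String) : Decidable (Spec_find_duplicate_strings_py values out) := by unfold Spec_find_duplicate_strings_py; infer_instance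

-- ===== CLAIM (what is proved, stated in full; the proofs are below) =====
def Claim_equal_find_duplicate_strings_py : Prop := ∀ (values : List String), Dom_find_duplicate_strings_py values → Spec_find_duplicate_strings_py values (find_duplicate_strings_py values)

-- ===== LEMMAS AND PROOFS =====

-- recursive form of B's fold (the first component of pvScan's list argument plays prev's role)
def pvScan : Option String → List String → List String
  | _, [] => []
  | _, [_] => []
  | last, a :: b :: t =>
    if a = b ∧ ¬ last = some b then b :: pvScan (some b) (b :: t)
    else pvScan last (b :: t)

lemma pvScan_spec (l : List String) (hl : l.Pairwise (· ≤ ·)) (last : Option String)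
    (hlast : ∀ v, last = some v → ∀ x ∈ l, v ≤ x) :
    (∀ k, k ∈ pvScan last l ↔ 2 ≤ l.count k ∧ ¬ last = some k) ∧
    (pvScan last l).Pairwise (· < ·) ∧
    (∀ v, last = some v → ∀ k ∈ pvScan last l, v < k) := by
  induction l generalizing last with
  | nil => simp [pvScan]
  | cons a t ih =>
    cases t with
    | nil =>
      refine ⟨fun k => ?_, by simp [pvScan], by simp [pvScan]⟩
      simp only [pvScan, List.not_mem_nil, false_iff, not_and]
      rintro hc
      exfalso
      by_cases h : a = k <;> simp [h] at hc
    | cons b t' =>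
      have hab : a ≤ b := (List.pairwise_cons.1 hl).1 b (by simp)
      have ht : (b :: t').Pairwise (· ≤ ·) := (List.pairwise_cons.1 hl).2
      have hble : ∀ x ∈ b :: t', b ≤ x := by
        intro x hx
        rcases List.mem_cons.1 hx with rfl | hx
        · exact le_refl x
        · exact (List.pairwise_cons.1 ht).1 x hx
      by_cases h : a = b ∧ ¬ last = some b
      · obtain ⟨heq, hlb⟩ := h
        subst heq
        obtain ⟨ihmem, ihpw, ihgt⟩ :=
          ih ht (some a) (fun v hv x hx => by injection hv with h'; subst h'; exact hble x hx)
        rw [pvScan, if_pos ⟨rfl, hlb⟩]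
        refine ⟨fun k => ?_, ?_, ?_⟩
        · rw [List.mem_cons, ihmem k]
          constructor
          · rintro (rfl | ⟨hc, hne⟩)
            · exact ⟨by simp, hlb⟩
            · have hka : ¬ a = k := fun hk => hne (by rw [hk])
              refine ⟨by simp [hka] at hc ⊢; omega, ?_⟩
              intro hlk
              have hkm : k ∈ a :: t' := List.count_pos_iff.1 (by omega)
              exact hka (le_antisymm (hble k hkm) (hlast k hlk a (by simp)))
          · rintro ⟨hc, hne⟩
            by_cases hka : a = k
            · exact Or.inl hka.symm
            · refine Or.inr ⟨by simp [hka] at hc ⊢; omega, ?_⟩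
              intro hk; injection hk with h'; exact hka h'
        · exact List.pairwise_cons.2 ⟨fun k hk => ihgt a rfl k hk, ihpw⟩
        · intro v hv k hk
          rcases List.mem_cons.1 hk with h' | hk
          · have hva : v ≤ k := by rw [h']; exact hlast v hv a (by simp)
            refine lt_of_le_of_ne hva (fun h2 => hlb ?_)
            rw [← h', ← h2]; exact hv
          · calc v ≤ a := hlast v hv a (by simp)
              _ < k := ihgt a rfl k hk
      · obtain ⟨ihmem, ihpw, ihgt⟩ :=
          ih ht last (fun v hv x hx => hlast v hv x (List.mem_cons_of_mem a hx))
        rw [pvScan, if_neg h]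
        refine ⟨fun k => ?_, ihpw, fun v hv k hk => ihgt v hv k hk⟩
        rw [ihmem k]
        constructor
        · rintro ⟨hc, hne⟩
          refine ⟨?_, hne⟩
          simp [List.count_cons] at hc ⊢
          omega
        · rintro ⟨hc, hne⟩
          refine ⟨?_, hne⟩
          by_cases hka : a = k
          · by_cases hbk : b = k
            · exfalso
              have hlb : last = some b := by
                rcases not_and_or.1 h with h1 | h1
                · exact absurd (hka.trans hbk.symm) h1
                · exact not_not.1 h1
              exact hne (by rw [hlb, hbk])
            · exfalso
              have hkm : k ∈ t' := by simp [hka, hbk] at hc; exact hc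
              have hb2 : b ≤ k := hble k (List.mem_cons_of_mem b hkm)
              exact hbk (le_antisymm hb2 (hka ▸ hab))
          · simp [List.count_cons, hka] at hc ⊢; omega

lemma pvFold_eq_scan (l : List String) (out : List String) (a : String) (last : Option String) :
    (l.foldl pvStepB (out, some a, last)).1 = out ++ pvScan last (a :: l) := by
  induction l generalizing out a last with
  | nil => simp [pvScan]
  | cons b t ih =>
    rw [List.foldl_cons]
    by_cases h : a = b ∧ ¬ last = some b
    · have hstep : pvStepB (out, some a, last) b = (out ++ [b], some b, some b) := by
        simp [pvStepB, h.1, h.2]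
      rw [hstep, ih, pvScan, if_pos h, List.append_assoc]
      rfl
    · have hstep : pvStepB (out, some a, last) b = (out, some b, last) := by
        unfold pvStepB
        rw [if_neg]
        simpa using h
      rw [hstep, ih, pvScan, if_neg h]

lemma pvScan_none (l : List String) (hl : l.Pairwise (· ≤ ·)) :
    (∀ k, k ∈ pvScan none l ↔ 2 ≤ l.count k) ∧ (pvScan none l).Pairwise (· < ·) := by
  obtain ⟨hmem, hpw, -⟩ := pvScan_spec l hl none (by rintro v ⟨⟩)
  exact ⟨fun k => by rw [hmem k]; simp, hpw⟩

-- B's result is pvScan none over the sorted key list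
lemma alt_eq_scan (values : List String) :
    find_duplicate_strings_py_alt values =
      pvScan none (PySem.List.sorted ((values.map pvKey).filter (fun k => k != "")) (fun x => x) false) := by
  unfold find_duplicate_strings_py_alt
  cases hs : PySem.List.sorted ((values.map pvKey).filter (fun k => k != "")) (fun x => x) false with
  | nil => simp [pvScan]
  | cons a t =>
    have h0 : pvStepB ([], none, none) a = ([], some a, none) := by
      simp [pvStepB]
    simp only [List.foldl_cons, h0]
    rw [pvFold_eq_scan]
    simp

-- A's counting fold from empty is Counter of the filtered normalized keys
lemma countsA_eq_counter (values : List String) :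
    values.foldl pvStepA PySem.Dict.empty =
      PySem.Dict.counter ((values.map pvKey).filter (fun k => k != "")) := by
  rw [← PySem.Dict.foldl_insert_getD_add_one_eq_counter,
      ← PySem.List.foldl_if_eq_foldl_filter (p := fun k => k != "")
        (f := fun (d : PySem.Dict String Int) k => d.insert k (d.getD k 0 + 1)),
      List.foldl_map]
  apply PySem.List.foldl_congr_mem
  intro d x _
  unfold pvStepA
  by_cases h : pvKey x = "" <;> simp [h]

-- A's pre-sort duplicate list is the filtered dedup of keys
lemma dupList_eq (ks : List String) :
    (((PySem.Dict.counter ks).items.filter (fun p => decide (1 < p.2))).map (fun p => p.1)) =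
      (PySem.Set.ofList ks).filter (fun k => decide (1 < (ks.count k : Int))) := by
  rw [PySem.Dict.items_counter, List.filter_map, List.map_map]
  simp [Function.comp_def]

-- ===== VERDICT (by name: the statement is the Claim_ definition above) =====
theorem find_duplicate_strings_py_spec : Claim_equal_find_duplicate_strings_py := by
  intro values _
  unfold Spec_find_duplicate_strings_py
  rw [alt_eq_scan]
  show PySem.List.sorted
      (((values.foldl pvStepA PySem.Dict.empty).items.filter (fun p => decide (1 < p.2))).map
        (fun p => p.1)) (fun x => x) false = _
  rw [countsA_eq_counter, dupList_eq]
  set ks := (values.map pvKey).filter (fun k => k != "") with hks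
  have hsorted : (PySem.List.sorted ks (fun x => x) false).Pairwise (· ≤ ·) := by
    have := PySem.List.sorted_pairwise ks (fun x => x)
    simpa using this
  obtain ⟨hmem, hpw⟩ := pvScan_none _ hsorted
  have hperm : (PySem.List.sorted ks (fun x => x) false).Perm ks := PySem.List.sorted_perm ks _ _
  apply PySem.List.sorted_eq_of_perm_of_pairwise_lt
  · rw [List.perm_iff_count]
    intro k
    have hnd1 : (pvScan none (PySem.List.sorted ks (fun x => x) false)).Nodup :=
      hpw.imp (fun h => ne_of_lt h)
    have hnd2 : ((PySem.Set.ofList ks).filter (fun k => decide (1 < (ks.count k : Int)))).Nodup :=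
      (PySem.Set.nodup_ofList ks).filter _
    have hm : k ∈ pvScan none (PySem.List.sorted ks (fun x => x) false) ↔
        k ∈ (PySem.Set.ofList ks).filter (fun k => decide (1 < (ks.count k : Int))) := by
      rw [hmem k, List.mem_filter, PySem.Set.mem_ofList, hperm.count_eq]
      constructor
      · intro h
        exact ⟨List.count_pos_iff.1 (by omega), by simp; omega⟩
      · rintro ⟨-, h⟩
        simp at h; omega
    by_cases hk : k ∈ pvScan none (PySem.List.sorted ks (fun x => x) false)
    · rw [List.count_eq_one_of_mem hnd1 hk, List.count_eq_one_of_mem hnd2 (hm.1 hk)]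
    · rw [List.count_eq_zero_of_not_mem hk, List.count_eq_zero_of_not_mem (fun h => hk (hm.2 h))]
  · simpa using hpw
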